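-- pv_equiv track=rewrite | github.com/Fabricio254/Locvix-GPT | locvix_gpt.py | ask_question
-- ===== SOURCE A (Python) =====
-- import unicodedata
--
-- def normalize_text(text):
--     """Normaliza texto removendo acentos, til, cedilha, etc."""
--     if not text:
--         return text
--     text = text.lower()
--     text = unicodedata.normalize('NFD', text)
--     text = ''.join(char for char in text if unicodedata.category(char) != 'Mn')
--     return text
--
-- def ask_question(question, qa_data):
--     """Busca resposta para uma pergunta"""
--     if not qa_data:
--         return None, []
--
--     question_lower = normalize_text(question)
--
--     # Busca direta por substring
--     for question_obj in qa_data.get("questions", []):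
--         if question_lower in normalize_text(question_obj['question']):
--             return question_obj['answer'], [question_obj]
--
--     best_match = None
--     best_score = 0
--
--     generic_words = {'o', 'a', 'os', 'as', 'um', 'uma', 'de', 'da', 'do', 'das', 'dos',
--                      'em', 'na', 'no', 'nas', 'nos', 'para', 'por', 'com', 'como', 'quando',
--                      'onde', 'que', 'qual', 'quais', 'quem', 'e', 'sao', 'foi', 'sera',
--                      'tem', 'ter', 'fazer', 'feito', 'pode', 'posso', 'devo', 'deve'}
--
--     for question_obj in qa_data.get("questions", []):
--         pergunta_excel = normalize_text(question_obj['question'])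
--         words_user = set(question_lower.split()) - generic_words
--         words_excel = set(pergunta_excel.split()) - generic_words
--
--         if len(words_user) == 0 or len(words_excel) == 0:
--             continue
--
--         common_words = words_user.intersection(words_excel)
--
--         if len(common_words) > 0:
--             score = len(common_words) / len(words_user)
--             if len(words_user) > 3 and len(common_words) < 2:
--                 continue
--             if score > best_score:
--                 best_score = score
--                 best_match = question_obj
--
--     if best_match and best_score > 0.3:
--         return best_match['answer'], [best_match]
--
--     return "Não encontrei uma resposta exata para sua pergunta. Tente usar as sugestões no painel lateral ou reformule sua pergunta.", []
-- ===== SOURCE B (Python) =====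
-- import unicodedata
--
-- GENERIC_WORDS = {'o', 'a', 'os', 'as', 'um', 'uma', 'de', 'da', 'do', 'das', 'dos',
--                  'em', 'na', 'no', 'nas', 'nos', 'para', 'por', 'com', 'como', 'quando',
--                  'onde', 'que', 'qual', 'quais', 'quem', 'e', 'sao', 'foi', 'sera',
--                  'tem', 'ter', 'fazer', 'feito', 'pode', 'posso', 'devo', 'deve'}
--
-- FALLBACK = "Não encontrei uma resposta exata para sua pergunta. Tente usar as sugestões no painel lateral ou reformule sua pergunta."
--
--
-- def normalize_text(text):
--     if not text:
--         return text
--     text = text.lower()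
--     text = unicodedata.normalize('NFD', text)
--     return ''.join(c for c in text if unicodedata.category(c) != 'Mn')
--
--
-- def ask_question(question, qa_data):
--     """Single pass: substring match returns immediately (a later overlap can
--     never beat it), otherwise the best word-overlap candidate is maintained
--     as an exact fraction (bc, bu) instead of a float score."""
--     if not qa_data:
--         return None, []
--
--     q = normalize_text(question)
--     words_user = set(q.split()) - GENERIC_WORDS
--
--     best, bc, bu = None, 0, 1
--     for obj in qa_data.get("questions", []):
--         stored = normalize_text(obj['question'])
--         if q in stored:
--             return obj['answer'], [obj]
--         if not words_user:
--             continue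
--         words_stored = set(stored.split()) - GENERIC_WORDS
--         common = words_user & words_stored
--         if not words_stored or not common:
--             continue
--         if len(words_user) > 3 and len(common) < 2:
--             continue
--         if len(common) * bu > bc * len(words_user):
--             best, bc, bu = obj, len(common), len(words_user)
--
--     if best is not None and 10 * bc > 3 * bu:
--         return best['answer'], [best]
--     return FALLBACK, []
-- ===== Notes on version B (the rewrite author's own statement) =====
-- stated objective: alternative
-- what changed: B makes a single pass over the question list (returning immediately on the first substring hit, which no later overlap match could outrank) instead of A's two full scans, hoists the user's filtered word set out of the loop instead of rebuilding it per question, and keeps the best score as an exact fraction (common, user) instead of a float.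
import Mathlib
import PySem

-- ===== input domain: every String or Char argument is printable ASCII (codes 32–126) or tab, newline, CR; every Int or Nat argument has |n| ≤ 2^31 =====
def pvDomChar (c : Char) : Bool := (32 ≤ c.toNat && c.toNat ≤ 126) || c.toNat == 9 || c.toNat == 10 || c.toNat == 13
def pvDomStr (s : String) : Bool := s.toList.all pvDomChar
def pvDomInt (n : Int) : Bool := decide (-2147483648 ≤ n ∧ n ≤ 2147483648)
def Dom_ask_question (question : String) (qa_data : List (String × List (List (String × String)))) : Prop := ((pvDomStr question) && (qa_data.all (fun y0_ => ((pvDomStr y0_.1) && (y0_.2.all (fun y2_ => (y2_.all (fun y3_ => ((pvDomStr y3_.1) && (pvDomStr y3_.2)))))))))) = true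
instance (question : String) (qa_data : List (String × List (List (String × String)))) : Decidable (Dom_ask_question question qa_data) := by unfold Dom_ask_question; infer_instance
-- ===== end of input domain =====

-- B replaces A's two scans of the question list by ONE pass with an immediate return on a
-- substring hit and an exact-fraction best-score accumulator; equivalence is about the return value.

-- ===== PORT A =====
-- normalize_text: exact on the ASCII input domain, where NFD is the identity and no
-- character has category Mn, so only the emptiness check and .lower() remain.
def pyNormalize (s : String) : String := if s == "" then s else PySem.Str.lower s

def pyGenericWords : PySem.Set String := PySem.Set.ofList
  ["o", "a", "os", "as", "um", "uma", "de", "da", "do", "das", "dos",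
   "em", "na", "no", "nas", "nos", "para", "por", "com", "como", "quando",
   "onde", "que", "qual", "quais", "quem", "e", "sao", "foi", "sera",
   "tem", "ter", "fazer", "feito", "pode", "posso", "devo", "deve"]

def pyFallback : String := "Não encontrei uma resposta exata para sua pergunta. Tente usar as sugestões no painel lateral ou reformule sua pergunta."

-- first loop of A: direct substring search, first match (obj['question'] is present under Pre_)
def askSubLoop (ql : String) : List (List (String × String)) → Option (List (String × String))
  | [] => none
  | obj :: rest =>
    if PySem.Str.isIn ql (pyNormalize ((List.lookup "question" obj).getD "")) then some obj
    else askSubLoop ql rest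

-- body of A's second loop; state = (best_match, best_score as the exact fraction bc/bu, initially 0/1).
-- Python compares float scores 'len(common)/len(words_user)'; the port compares the fractions
-- exactly by cross-multiplication, which is what the float comparison computes at these set sizes.
def askOvStep (ql : String) (st : Option (List (String × String)) × Int × Int)
    (obj : List (String × String)) : Option (List (String × String)) × Int × Int :=
  let pergunta_excel := pyNormalize ((List.lookup "question" obj).getD "")
  let words_user := PySem.Set.diff (PySem.Set.ofList (PySem.Str.split₀ ql)) pyGenericWords
  let words_excel := PySem.Set.diff (PySem.Set.ofList (PySem.Str.split₀ pergunta_excel)) pyGenericWords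
  if PySem.Set.len words_user = 0 ∨ PySem.Set.len words_excel = 0 then st
  else
    let common_words := PySem.Set.inter words_user words_excel
    if PySem.Set.len common_words > 0 then
      if PySem.Set.len words_user > 3 ∧ PySem.Set.len common_words < 2 then st
      else if PySem.Set.len common_words * st.2.2 > st.2.1 * PySem.Set.len words_user then
        (some obj, PySem.Set.len common_words, PySem.Set.len words_user)
      else st
    else st

def ask_question (question : String) (qa_data : List (String × List (List (String × String)))) : Option String × (List (List (String × String))) :=
  if qa_data = [] then (none, [])
  else
    let question_lower := pyNormalize question
    let questions := (List.lookup "questions" qa_data).getD []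
    match askSubLoop question_lower questions with
    | some obj => (some ((List.lookup "answer" obj).getD ""), [obj])
    | none =>
      let st := questions.foldl (askOvStep question_lower) (none, 0, 1)
      match st.1 with
      | some best =>
          -- 'if best_match and best_score > 0.3': nonempty-dict truthiness, threshold 10·bc > 3·bu
          if best ≠ [] ∧ 10 * st.2.1 > 3 * st.2.2 then
            (some ((List.lookup "answer" best).getD ""), [best])
          else (some pyFallback, [])
      | none => (some pyFallback, [])

-- ===== PORT B =====
-- the filtered word set of a normalized sentence (B computes it once for the user's question)
def altWords (s : String) : PySem.Set String :=
  PySem.Set.diff (PySem.Set.ofList (PySem.Str.split₀ s)) pyGenericWords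

-- B's single loop: return on a substring hit, otherwise keep the best (obj, bc, bu)
def altLoop (q : String) (words_user : PySem.Set String) :
    List (List (String × String)) → Option (List (String × String)) × Int × Int →
    Option String × (List (List (String × String)))
  | [], (best, bc, bu) =>
      match best with
      | some b => if 10 * bc > 3 * bu then (some ((List.lookup "answer" b).getD ""), [b])
                  else (some pyFallback, [])
      | none => (some pyFallback, [])
  | obj :: rest, (best, bc, bu) =>
      let stored := pyNormalize ((List.lookup "question" obj).getD "")
      if PySem.Str.isIn q stored then (some ((List.lookup "answer" obj).getD ""), [obj])
      else if words_user.isEmpty then altLoop q words_user rest (best, bc, bu)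
      else
        let words_stored := altWords stored
        let common := PySem.Set.inter words_user words_stored
        if words_stored.isEmpty || common.isEmpty then altLoop q words_user rest (best, bc, bu)
        else if PySem.Set.len words_user > 3 ∧ PySem.Set.len common < 2 then
          altLoop q words_user rest (best, bc, bu)
        else if PySem.Set.len common * bu > bc * PySem.Set.len words_user then
          altLoop q words_user rest (some obj, PySem.Set.len common, PySem.Set.len words_user)
        else altLoop q words_user rest (best, bc, bu)

def ask_question_alt (question : String) (qa_data : List (String × List (List (String × String)))) : Option String × (List (List (String × String))) :=
  if qa_data = [] then (none, [])
  else
    let q := pyNormalize question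
    altLoop q (altWords q) ((List.lookup "questions" qa_data).getD []) (none, 0, 1)

-- ===== PRECONDITION & SPEC =====
-- Pre_ excludes inputs where some question dict lacks a 'question' or 'answer' key: there A
-- raises KeyError as soon as such a dict is reached (a mild narrowing: a dict placed after an
-- early substring return, or one missing only 'answer' and never returned, is excluded too
-- although A still returns — B behaves identically on those).
def Pre_ask_question (question : String) (qa_data : List (String × List (List (String × String)))) : Prop :=
  qa_data = [] ∨ ∀ obj ∈ (List.lookup "questions" qa_data).getD [],
    (List.lookup "question" obj).isSome ∧ (List.lookup "answer" obj).isSome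
instance (question : String) (qa_data : List (String × List (List (String × String)))) : Decidable (Pre_ask_question question qa_data) := by unfold Pre_ask_question; infer_instance

def pvWitness_ask_question : String × (List (String × List (List (String × String)))) :=
  ("qual a casa azul", [("questions", [[("question", "onde fica a casa azul"), ("answer", "na rua 7")]])])

def Spec_ask_question (question : String) (qa_data : List (String × List (List (String × String)))) (out : Option String × (List (List (String × String)))) : Prop := out = ask_question_alt question qa_data
instance (question : String) (qa_data : List (String × List (List (String × String)))) (out : Option String × (List (List (String × String)))) : Decidable (Spec_ask_question question qa_data out) := by unfold Spec_ask_question; infer_instance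

-- ===== CLAIM (what is proved, stated in full; the proofs are below) =====
def Claim_equal_ask_question : Prop := ∀ (question : String) (qa_data : List (String × List (List (String × String)))), Dom_ask_question question qa_data → Pre_ask_question question qa_data → Spec_ask_question question qa_data (ask_question question qa_data)

-- ===== LEMMAS AND PROOFS =====

theorem set_len_eq {α : Type} (s : PySem.Set α) : PySem.Set.len s = (s.length : Int) := rfl

-- A's loop body, rearranged into the branch order B tests in (same state result on every input)
theorem step_shape (q : String) (st : Option (List (String × String)) × Int × Int)
    (obj : List (String × String)) :
    askOvStep q st obj =
      (let wu := altWords q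
       let ws := altWords (pyNormalize ((List.lookup "question" obj).getD ""))
       let cm := PySem.Set.inter wu ws
       if wu.isEmpty then st
       else if ws.isEmpty || cm.isEmpty then st
       else if PySem.Set.len wu > 3 ∧ PySem.Set.len cm < 2 then st
       else if PySem.Set.len cm * st.2.2 > st.2.1 * PySem.Set.len wu then
         (some obj, PySem.Set.len cm, PySem.Set.len wu)
       else st) := by
  unfold askOvStep altWords
  simp only [set_len_eq, List.isEmpty_iff, ← List.length_eq_zero_iff, Bool.or_eq_true]
  split_ifs <;> first | rfl | (exfalso; omega)

-- the single pass of B computes exactly 'substring scan first, then best-overlap scan' of A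
theorem altLoop_eq (q : String) (L : List (List (String × String)))
    (st : Option (List (String × String)) × Int × Int)
    (hL : ∀ o ∈ L, (List.lookup "question" o).isSome)
    (hst : ∀ b, st.1 = some b → b ≠ []) :
    altLoop q (altWords q) L st =
      match askSubLoop q L with
      | some obj => (some ((List.lookup "answer" obj).getD ""), [obj])
      | none =>
        match (L.foldl (askOvStep q) st).1 with
        | some best =>
            if best ≠ [] ∧ 10 * (L.foldl (askOvStep q) st).2.1 > 3 * (L.foldl (askOvStep q) st).2.2 then
              (some ((List.lookup "answer" best).getD ""), [best])
            else (some pyFallback, [])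
        | none => (some pyFallback, []) := by
  induction L generalizing st with
  | nil =>
      obtain ⟨best, bc, bu⟩ := st
      cases best with
      | none => simp [altLoop, askSubLoop]
      | some b =>
          have hb : b ≠ [] := hst b rfl
          simp [altLoop, askSubLoop, hb]
  | cons obj rest ih =>
      obtain ⟨best, bc, bu⟩ := st
      have hobj : obj ≠ [] := by
        intro h
        have := hL obj (by simp)
        simp [h, List.lookup_nil] at this
      have hrest : ∀ o ∈ rest, (List.lookup "question" o).isSome := fun o ho => hL o (by simp [ho])
      by_cases hin : PySem.Chars.isIn q.toList (pyNormalize ((List.lookup "question" obj).getD "")).toList = true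
      · simp [altLoop, askSubLoop, hin]
      · have hnin : PySem.Chars.isIn q.toList (pyNormalize ((List.lookup "question" obj).getD "")).toList = false := by
          simpa using hin
        have hB : altLoop q (altWords q) (obj :: rest) (best, bc, bu)
            = altLoop q (altWords q) rest (askOvStep q (best, bc, bu) obj) := by
          rw [step_shape]
          simp only [altLoop, PySem.Str.isIn_eq, hnin, Bool.false_eq_true, if_false]
          split_ifs <;> rfl
        have hst' : ∀ b, (askOvStep q (best, bc, bu) obj).1 = some b → b ≠ [] := by
          intro b hb
          unfold askOvStep at hb
          simp only at hb
          split_ifs at hb <;> simp_all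
        rw [hB, ih _ hrest hst']
        simp only [askSubLoop, PySem.Str.isIn_eq, hnin, Bool.false_eq_true, if_false, List.foldl_cons]
        rfl

theorem ask_question_spec : Claim_equal_ask_question := by
  unfold Claim_equal_ask_question Spec_ask_question
  intro question qa_data _ hpre
  by_cases hqa : qa_data = []
  · simp [ask_question, ask_question_alt, hqa]
  · have hkeys : ∀ obj ∈ (List.lookup "questions" qa_data).getD [],
        (List.lookup "question" obj).isSome := by
      intro obj hobj
      rcases hpre with h | h
      · exact absurd h hqa
      · exact (h obj hobj).1
    unfold ask_question ask_question_alt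
    simp only [hqa, if_false]
    exact (altLoop_eq (pyNormalize question) _ (none, 0, 1) hkeys (by simp)).symm
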